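-- pv_equiv track=rewrite | github.com/msymkany/n_puzzle | parser.py | make_solved_puzzle
-- ===== SOURCE A (Python) =====
-- def make_solved_puzzle(a):
--     p = [0] * a * a
--     size = a - 1
--     row = 0
--     col = -1
--     way_row = 0
--     way_col = 1
--     step = 1
--     zone00 = 0
--     zone01 = 0
--     zone11 = 0
--     zone10 = 0
--     while step < a * a:
--         row += way_row
--         col += way_col
--         p[row * a + col] = step
--         if (row == (zone00) and col == zone00 - 1): # 0 0
--             way_row = 0
--             way_col = 1
--             zone10 += 1
--         elif (col == (size - zone01) and row == (0 + zone01)): # 0 1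
--             way_row = 1
--             way_col = 0
--             zone00 += 1
--         elif (row == (size - zone11) and col == (size - zone11)): # 1 1
--             way_row = 0
--             way_col = -1
--             zone01 += 1
--         elif (col == (zone10) and row == (size - zone10)): # 1 0
--             way_row = -1
--             way_col = 0
--             zone11 += 1
--         step += 1
--     return (p)
-- ===== SOURCE B (Python) =====
-- def make_solved_puzzle(a):
--     p = [0] * a * a
--     coords = []
--     top, bottom, left, right = 0, a - 1, 0, a - 1
--     while top <= bottom and left <= right:
--         for c in range(left, right + 1):
--             coords.append((top, c))
--         top += 1
--         for r in range(top, bottom + 1):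
--             coords.append((r, right))
--         right -= 1
--         if top <= bottom:
--             for c in range(right, left - 1, -1):
--                 coords.append((bottom, c))
--             bottom -= 1
--         if left <= right:
--             for r in range(bottom, top - 1, -1):
--                 coords.append((r, left))
--             left += 1
--     for i, (r, c) in enumerate(coords):
--         if i < a * a - 1:
--             p[r * a + c] = i + 1
--     return p
-- ===== Notes on version B (the rewrite author's own statement) =====
-- stated objective: simpler
-- what changed: Replaces A's cell-by-cell direction-vector simulation with four corner-condition zone counters by the standard boundary-bounds spiral (top/bottom/left/right shrinking after each directional run), generating the coordinate path per run and then writing 1..a*a-1 along it.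
-- outside the precondition, e.g. on make_solved_puzzle(-2): A raises IndexError, B returns []
import Mathlib
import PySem

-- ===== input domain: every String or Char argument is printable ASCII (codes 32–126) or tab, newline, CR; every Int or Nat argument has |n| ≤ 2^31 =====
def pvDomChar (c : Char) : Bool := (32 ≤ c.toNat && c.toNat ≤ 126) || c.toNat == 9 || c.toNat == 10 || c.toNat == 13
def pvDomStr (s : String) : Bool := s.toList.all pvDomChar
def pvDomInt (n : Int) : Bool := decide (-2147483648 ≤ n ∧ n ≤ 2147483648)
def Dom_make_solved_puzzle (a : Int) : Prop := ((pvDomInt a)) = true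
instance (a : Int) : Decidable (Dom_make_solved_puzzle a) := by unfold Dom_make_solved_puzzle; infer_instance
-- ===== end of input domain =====

-- B replaces A's per-cell direction/zone-counter simulation by the standard shrinking-bounds
-- spiral (objective: simpler). Return-value equivalence only (neither version mutates inputs).

-- ===== PORT A =====
-- the while loop; fuel = number of iterations: step runs 1,2,… while step < a*a, so (a*a-1).toNat
def pvLoopA (a size : Int) : Nat → List Int → Int → Int → Int → Int → Int → Int → Int → Int → Int → List Int
  | 0, p, _, _, _, _, _, _, _, _, _ => p
  | fuel+1, p, row, col, wayRow, wayCol, step, z00, z01, z11, z10 =>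
    let row' := row + wayRow
    let col' := col + wayCol
    let p' := PySem.List.pySetD p (row' * a + col') step   -- p[row*a+col] = step; in range on Pre_
    if row' = z00 ∧ col' = z00 - 1 then
      pvLoopA a size fuel p' row' col' 0 1 (step+1) z00 z01 z11 (z10+1)
    else if col' = size - z01 ∧ row' = z01 then
      pvLoopA a size fuel p' row' col' 1 0 (step+1) (z00+1) z01 z11 z10
    else if row' = size - z11 ∧ col' = size - z11 then
      pvLoopA a size fuel p' row' col' 0 (-1) (step+1) z00 (z01+1) z11 z10
    else if col' = z10 ∧ row' = size - z10 then
      pvLoopA a size fuel p' row' col' (-1) 0 (step+1) z00 z01 (z11+1) z10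
    else
      pvLoopA a size fuel p' row' col' wayRow wayCol (step+1) z00 z01 z11 z10

def make_solved_puzzle (a : Int) : List Int :=
  -- p = [0] * a * a  (Python list repetition; non-positive count gives [])
  let p := (List.replicate a.toNat (List.replicate a.toNat (0:Int))).flatten
  pvLoopA a (a-1) ((a*a - 1).toNat) p 0 (-1) 0 1 1 0 0 0 0

-- ===== PORT B =====
-- the while loop of Source B; fuel bounds the iteration count ((bottom+2-top).toNat strictly
-- decreases each pass), the real loop guard is still checked every iteration
def pvSpiralB (fuel : Nat) (top bottom left right : Int) (coords : List (Int × Int)) : List (Int × Int) :=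
  match fuel with
  | 0 => coords
  | fuel+1 =>
    if top ≤ bottom ∧ left ≤ right then
      let coords1 := coords ++ (PySem.List.pyRange left (right+1) 1).map (fun c => (top, c))
      let top1 := top + 1
      let coords2 := coords1 ++ (PySem.List.pyRange top1 (bottom+1) 1).map (fun r => (r, right))
      let right1 := right - 1
      let coords3 := if top1 ≤ bottom then
          coords2 ++ (PySem.List.pyRange right1 (left-1) (-1)).map (fun c => (bottom, c))
        else coords2
      let bottom1 := if top1 ≤ bottom then bottom - 1 else bottom
      let coords4 := if left ≤ right1 then
          coords3 ++ (PySem.List.pyRange bottom1 (top1-1) (-1)).map (fun r => (r, left))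
        else coords3
      let left1 := if left ≤ right1 then left + 1 else left
      pvSpiralB fuel top1 bottom1 left1 right1 coords4
    else coords

def make_solved_puzzle_alt (a : Int) : List Int :=
  let p := (List.replicate a.toNat (List.replicate a.toNat (0:Int))).flatten
  let coords := pvSpiralB (a+1).toNat 0 (a-1) 0 (a-1) []
  (PySem.List.enumerate coords 0).foldl
    (fun q ic => if ic.1 < a*a - 1 then PySem.List.pySetD q (ic.2.1 * a + ic.2.2) (ic.1 + 1) else q) p

-- ===== PRECONDITION & SPEC =====
-- For a ≤ -2 the Python A raises IndexError (p is empty but the loop writes into it).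
def Pre_make_solved_puzzle (a : Int) : Prop := -1 ≤ a
instance (a : Int) : Decidable (Pre_make_solved_puzzle a) := by unfold Pre_make_solved_puzzle; infer_instance
def pvWitness_make_solved_puzzle : Int := 3

def Spec_make_solved_puzzle (a : Int) (out : List Int) : Prop := out = make_solved_puzzle_alt a
instance (a : Int) (out : List Int) : Decidable (Spec_make_solved_puzzle a out) := by unfold Spec_make_solved_puzzle; infer_instance

-- ===== CLAIM (what is proved, stated in full; the proofs are below) =====
def Claim_equal_make_solved_puzzle : Prop := ∀ (a : Int), Dom_make_solved_puzzle a → Pre_make_solved_puzzle a → Spec_make_solved_puzzle a (make_solved_puzzle a)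

-- ===== LEMMAS AND PROOFS =====

def pvEmitA (size : Int) : Nat → Int → Int → Int → Int → Int → Int → Int → Int → List (Int × Int)
  | 0, _, _, _, _, _, _, _, _ => []
  | fuel+1, row, col, wr, wc, z00, z01, z11, z10 =>
    let row' := row + wr
    let col' := col + wc
    (row', col') ::
      (if row' = z00 ∧ col' = z00 - 1 then pvEmitA size fuel row' col' 0 1 z00 z01 z11 (z10+1)
      else if col' = size - z01 ∧ row' = z01 then pvEmitA size fuel row' col' 1 0 (z00+1) z01 z11 z10
      else if row' = size - z11 ∧ col' = size - z11 then pvEmitA size fuel row' col' 0 (-1) z00 (z01+1) z11 z10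
      else if col' = z10 ∧ row' = size - z10 then pvEmitA size fuel row' col' (-1) 0 z00 z01 (z11+1) z10
      else pvEmitA size fuel row' col' wr wc z00 z01 z11 z10)

def pvNoFire (size row col z00 z01 z11 z10 : Int) : Prop :=
  ¬(row = z00 ∧ col = z00 - 1) ∧ ¬(col = size - z01 ∧ row = z01) ∧
  ¬(row = size - z11 ∧ col = size - z11) ∧ ¬(col = z10 ∧ row = size - z10)


theorem pvRunRight (size : Int) (j : Nat) :
    ∀ (k : Nat) (row col z00 z01 z11 z10 : Int),
    (∀ i : Int, 0 ≤ i → i < j → pvNoFire size row (col+1+i) z00 z01 z11 z10) →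
    pvEmitA size (j + k) row col 0 1 z00 z01 z11 z10
      = (PySem.List.pyRange (col+1) (col+1+j) 1).map (fun c => (row, c))
        ++ pvEmitA size k row (col + j) 0 1 z00 z01 z11 z10 := by
  induction j with
  | zero =>
    intro k row col z00 z01 z11 z10 _
    rw [PySem.List.pyRange_one_eq_nil (by omega)]; norm_num
  | succ j ih =>
    intro k row col z00 z01 z11 z10 hyp
    obtain ⟨h1, h2, h3, h4⟩ := hyp 0 (by omega) (by push_cast; omega)
    rw [show j+1+k = (j+k)+1 by omega]
    simp only [pvEmitA]
    rw [if_neg (by omega), if_neg (by omega), if_neg (by omega), if_neg (by omega)]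
    rw [show row + 0 = row by ring]
    rw [PySem.List.pyRange_one_cons (by push_cast; omega), List.map_cons, List.cons_append]
    push_cast
    rw [show col+1+((j:Int)+1) = col+1+1+(j:Int) by ring]
    rw [show col+((j:Int)+1) = col+1+(j:Int) by ring]
    exact congrArg _ (ih k row (col+1) z00 z01 z11 z10 (by
      intro i h0 hi
      rw [show col+1+1+i = col+1+(i+1) by ring]
      exact hyp (i+1) (by omega) (by push_cast at hi ⊢; omega)))

theorem pvRunDown (size : Int) (j : Nat) :
    ∀ (k : Nat) (row col z00 z01 z11 z10 : Int),
    (∀ i : Int, 0 ≤ i → i < j → pvNoFire size (row+1+i) col z00 z01 z11 z10) →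
    pvEmitA size (j + k) row col 1 0 z00 z01 z11 z10
      = (PySem.List.pyRange (row+1) (row+1+j) 1).map (fun r => (r, col))
        ++ pvEmitA size k (row + j) col 1 0 z00 z01 z11 z10 := by
  induction j with
  | zero =>
    intro k row col z00 z01 z11 z10 _
    rw [PySem.List.pyRange_one_eq_nil (by omega)]; norm_num
  | succ j ih =>
    intro k row col z00 z01 z11 z10 hyp
    obtain ⟨h1, h2, h3, h4⟩ := hyp 0 (by omega) (by push_cast; omega)
    rw [show j+1+k = (j+k)+1 by omega]
    simp only [pvEmitA]
    rw [if_neg (by omega), if_neg (by omega), if_neg (by omega), if_neg (by omega)]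
    rw [show col + 0 = col by ring]
    rw [PySem.List.pyRange_one_cons (by push_cast; omega), List.map_cons, List.cons_append]
    push_cast
    rw [show row+1+((j:Int)+1) = row+1+1+(j:Int) by ring]
    rw [show row+((j:Int)+1) = row+1+(j:Int) by ring]
    exact congrArg _ (ih k (row+1) col z00 z01 z11 z10 (by
      intro i h0 hi
      rw [show row+1+1+i = row+1+(i+1) by ring]
      exact hyp (i+1) (by omega) (by push_cast at hi ⊢; omega)))

theorem pvRunLeft (size : Int) (j : Nat) :
    ∀ (k : Nat) (row col z00 z01 z11 z10 : Int),
    (∀ i : Int, 0 ≤ i → i < j → pvNoFire size row (col-1-i) z00 z01 z11 z10) →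
    pvEmitA size (j + k) row col 0 (-1) z00 z01 z11 z10
      = (PySem.List.pyRange (col-1) (col-1-j) (-1)).map (fun c => (row, c))
        ++ pvEmitA size k row (col - j) 0 (-1) z00 z01 z11 z10 := by
  induction j with
  | zero =>
    intro k row col z00 z01 z11 z10 _
    rw [PySem.List.pyRange_neg_one_eq_nil (by omega)]; norm_num
  | succ j ih =>
    intro k row col z00 z01 z11 z10 hyp
    obtain ⟨h1, h2, h3, h4⟩ := hyp 0 (by omega) (by push_cast; omega)
    rw [show j+1+k = (j+k)+1 by omega]
    simp only [pvEmitA]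
    rw [if_neg (by omega), if_neg (by omega), if_neg (by omega), if_neg (by omega)]
    rw [show row + 0 = row by ring, show col + -1 = col - 1 by ring]
    rw [PySem.List.pyRange_neg_one_cons (by push_cast; omega), List.map_cons, List.cons_append]
    push_cast
    rw [show col-1-((j:Int)+1) = col-1-1-(j:Int) by ring]
    rw [show col-((j:Int)+1) = col-1-(j:Int) by ring]
    exact congrArg _ (ih k row (col-1) z00 z01 z11 z10 (by
      intro i h0 hi
      rw [show col-1-1-i = col-1-(i+1) by ring]
      exact hyp (i+1) (by omega) (by push_cast at hi ⊢; omega)))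

theorem pvRunUp (size : Int) (j : Nat) :
    ∀ (k : Nat) (row col z00 z01 z11 z10 : Int),
    (∀ i : Int, 0 ≤ i → i < j → pvNoFire size (row-1-i) col z00 z01 z11 z10) →
    pvEmitA size (j + k) row col (-1) 0 z00 z01 z11 z10
      = (PySem.List.pyRange (row-1) (row-1-j) (-1)).map (fun r => (r, col))
        ++ pvEmitA size k (row - j) col (-1) 0 z00 z01 z11 z10 := by
  induction j with
  | zero =>
    intro k row col z00 z01 z11 z10 _
    rw [PySem.List.pyRange_neg_one_eq_nil (by omega)]; norm_num
  | succ j ih =>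
    intro k row col z00 z01 z11 z10 hyp
    obtain ⟨h1, h2, h3, h4⟩ := hyp 0 (by omega) (by push_cast; omega)
    rw [show j+1+k = (j+k)+1 by omega]
    simp only [pvEmitA]
    rw [if_neg (by omega), if_neg (by omega), if_neg (by omega), if_neg (by omega)]
    rw [show row + -1 = row - 1 by ring, show col + 0 = col by ring]
    rw [PySem.List.pyRange_neg_one_cons (by push_cast; omega), List.map_cons, List.cons_append]
    push_cast
    rw [show row-1-((j:Int)+1) = row-1-1-(j:Int) by ring]
    rw [show row-((j:Int)+1) = row-1-(j:Int) by ring]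
    exact congrArg _ (ih k (row-1) col z00 z01 z11 z10 (by
      intro i h0 hi
      rw [show row-1-1-i = row-1-(i+1) by ring]
      exact hyp (i+1) (by omega) (by push_cast at hi ⊢; omega)))

theorem pvStep1 (size : Int) (k : Nat) (row col wr wc z00 z01 z11 z10 : Int)
    (h : row+wr = z00 ∧ col+wc = z00 - 1) :
    pvEmitA size (k+1) row col wr wc z00 z01 z11 z10
      = (row+wr, col+wc) :: pvEmitA size k (row+wr) (col+wc) 0 1 z00 z01 z11 (z10+1) := by
  simp only [pvEmitA]; rw [if_pos h]

theorem pvStep2 (size : Int) (k : Nat) (row col wr wc z00 z01 z11 z10 : Int)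
    (h1 : ¬(row+wr = z00 ∧ col+wc = z00 - 1)) (h : col+wc = size - z01 ∧ row+wr = z01) :
    pvEmitA size (k+1) row col wr wc z00 z01 z11 z10
      = (row+wr, col+wc) :: pvEmitA size k (row+wr) (col+wc) 1 0 (z00+1) z01 z11 z10 := by
  simp only [pvEmitA]; rw [if_neg h1, if_pos h]

theorem pvStep3 (size : Int) (k : Nat) (row col wr wc z00 z01 z11 z10 : Int)
    (h1 : ¬(row+wr = z00 ∧ col+wc = z00 - 1)) (h2 : ¬(col+wc = size - z01 ∧ row+wr = z01))
    (h : row+wr = size - z11 ∧ col+wc = size - z11) :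
    pvEmitA size (k+1) row col wr wc z00 z01 z11 z10
      = (row+wr, col+wc) :: pvEmitA size k (row+wr) (col+wc) 0 (-1) z00 (z01+1) z11 z10 := by
  simp only [pvEmitA]; rw [if_neg h1, if_neg h2, if_pos h]

theorem pvStep4 (size : Int) (k : Nat) (row col wr wc z00 z01 z11 z10 : Int)
    (h1 : ¬(row+wr = z00 ∧ col+wc = z00 - 1)) (h2 : ¬(col+wc = size - z01 ∧ row+wr = z01))
    (h3 : ¬(row+wr = size - z11 ∧ col+wc = size - z11)) (h : col+wc = z10 ∧ row+wr = size - z10) :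
    pvEmitA size (k+1) row col wr wc z00 z01 z11 z10
      = (row+wr, col+wc) :: pvEmitA size k (row+wr) (col+wc) (-1) 0 z00 z01 (z11+1) z10 := by
  simp only [pvEmitA]; rw [if_neg h1, if_neg h2, if_neg h3, if_pos h]

theorem pvPyRange_neg_succ (a b : Int) (hb : b ≤ a) :
    PySem.List.pyRange a (b-1) (-1) = PySem.List.pyRange a b (-1) ++ [b] := by
  rw [PySem.List.pyRange_neg_one, PySem.List.pyRange_neg_one]
  rw [show (a-(b-1)).toNat = (a-b).toNat + 1 by omega, List.range_succ]
  rw [List.map_append]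
  congr 1
  simp only [List.map_cons, List.map_nil]
  congr 1
  omega

theorem pvRing (n : Nat) (m size : Int) (hs : size = 2*m + n + 2) (k : Nat) :
    pvEmitA size (4*(n+2) + k) m (m-1) 0 1 m m m m
      = (PySem.List.pyRange m (size-m+1) 1).map (fun c => (m, c))
        ++ ((PySem.List.pyRange (m+1) (size-m+1) 1).map (fun r => (r, size-m))
        ++ ((PySem.List.pyRange (size-m-1) (m-1) (-1)).map (fun c => (size-m, c))
        ++ ((PySem.List.pyRange (size-m-1) m (-1)).map (fun r => (r, m))
        ++ pvEmitA size k (m+1) m 0 1 (m+1) (m+1) (m+1) (m+1)))) := by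
  rw [show 4*(n+2)+k = (n+2) + (1 + ((n+1) + (1 + ((n+1) + (1 + (n + (1 + k))))))) by omega]
  rw [pvRunRight size (n+2) _ m (m-1) m m m m (by
    intro i h0 hi; push_cast at hi
    unfold pvNoFire; omega)]
  push_cast
  rw [show m-1+((n:Int)+2) = m+n+1 by ring]
  rw [Nat.add_comm 1 (n + 1 + (1 + (n + 1 + (1 + (n + (1 + k))))))]
  rw [pvStep2 size _ m (m+n+1) 0 1 m m m m (by omega) (by constructor <;> omega)]
  rw [show (m:Int)+0 = m by ring, show (m:Int)+n+1+1 = m+n+2 by ring]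
  rw [pvRunDown size (n+1) _ m (m+n+2) (m+1) m m m (by
    intro i h0 hi; push_cast at hi; unfold pvNoFire; omega)]
  push_cast
  rw [show m+((n:Int)+1) = m+n+1 by ring]
  rw [Nat.add_comm 1 (n + 1 + (1 + (n + (1 + k))))]
  rw [pvStep3 size _ (m+n+1) (m+n+2) 1 0 (m+1) m m m (by omega) (by omega) (by constructor <;> omega)]
  rw [show (m:Int)+n+1+1 = m+n+2 by ring, show (m:Int)+n+2+0 = m+n+2 by ring]
  rw [pvRunLeft size (n+1) _ (m+n+2) (m+n+2) (m+1) (m+1) m m (by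
    intro i h0 hi; unfold pvNoFire; omega)]
  push_cast
  rw [show m+(n:Int)+2-((n:Int)+1) = m+1 by ring]
  rw [Nat.add_comm 1 (n + (1 + k))]
  rw [pvStep4 size _ (m+n+2) (m+1) 0 (-1) (m+1) (m+1) m m (by omega) (by omega) (by omega) (by constructor <;> omega)]
  rw [show (m:Int)+n+2+0 = m+n+2 by ring, show (m:Int)+1+-1 = m by ring]
  rw [pvRunUp size n _ (m+n+2) m (m+1) (m+1) (m+1) m (by
    intro i h0 hi; unfold pvNoFire; omega)]
  rw [show (m:Int)+n+2-(n:Int) = m+2 by ring]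
  rw [Nat.add_comm 1 k]
  rw [pvStep1 size k (m+2) m (-1) 0 (m+1) (m+1) (m+1) m (by constructor <;> omega)]
  rw [show (m:Int)+2+-1 = m+1 by ring, show (m:Int)+0 = m by ring]
  subst hs
  ring_nf
  have e1 : PySem.List.pyRange m (3+m+(n:Int)) 1 = PySem.List.pyRange m (2+m+(n:Int)) 1 ++ [2+m+(n:Int)] := by
    rw [show (3:Int)+m+(n:Int) = (2+m+(n:Int))+1 by ring]
    exact PySem.List.pyRange_one_succ_right (by omega)
  have e2 : PySem.List.pyRange (1+m) (3+m+(n:Int)) 1 = PySem.List.pyRange (1+m) (2+m+(n:Int)) 1 ++ [2+m+(n:Int)] := by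
    rw [show (3:Int)+m+(n:Int) = (2+m+(n:Int))+1 by ring]
    exact PySem.List.pyRange_one_succ_right (by omega)
  have e3 : PySem.List.pyRange (1+m+(n:Int)) (-1+m) (-1) = PySem.List.pyRange (1+m+(n:Int)) m (-1) ++ [m] := by
    rw [show (-1:Int)+m = m-1 by ring]
    exact pvPyRange_neg_succ _ _ (by omega)
  have e4 : PySem.List.pyRange (1+m+(n:Int)) m (-1) = PySem.List.pyRange (1+m+(n:Int)) (1+m) (-1) ++ [1+m] := by
    rw [show (m:Int) = (1+m)-1 by ring]
    rw [pvPyRange_neg_succ _ _ (by omega)]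
    norm_num
  rw [e1, e2, e3, e4]
  simp [List.map_append, List.append_assoc]

theorem pvStep0 (size : Int) (k : Nat) (row col wr wc z00 z01 z11 z10 : Int)
    (h1 : ¬(row+wr = z00 ∧ col+wc = z00 - 1)) (h2 : ¬(col+wc = size - z01 ∧ row+wr = z01))
    (h3 : ¬(row+wr = size - z11 ∧ col+wc = size - z11)) (h4 : ¬(col+wc = z10 ∧ row+wr = size - z10)) :
    pvEmitA size (k+1) row col wr wc z00 z01 z11 z10
      = (row+wr, col+wc) :: pvEmitA size k (row+wr) (col+wc) wr wc z00 z01 z11 z10 := by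
  simp only [pvEmitA]; rw [if_neg h1, if_neg h2, if_neg h3, if_neg h4]

theorem pvSpiralB_acc (fuel : Nat) : ∀ (t b l r : Int) (acc : List (Int × Int)),
    pvSpiralB fuel t b l r acc = acc ++ pvSpiralB fuel t b l r [] := by
  induction fuel with
  | zero => intro t b l r acc; simp [pvSpiralB]
  | succ fuel ih =>
    intro t b l r acc
    simp only [pvSpiralB]
    by_cases h : t ≤ b ∧ l ≤ r
    · rw [if_pos h, if_pos h]
      rw [ih]
      conv_rhs => rw [ih]
      split_ifs <;> simp [List.append_assoc]
    · rw [if_neg h, if_neg h]; simp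

def pvApplyW (a : Int) : List Int → List (Int × Int) → Int → List Int
  | p, [], _ => p
  | p, (r, c) :: rest, v => pvApplyW a (PySem.List.pySetD p (r*a+c) v) rest (v+1)

theorem pvLoopA_applyW (a size : Int) (fuel : Nat) :
    ∀ (p : List Int) (row col wr wc step z00 z01 z11 z10 : Int),
    pvLoopA a size fuel p row col wr wc step z00 z01 z11 z10
      = pvApplyW a p (pvEmitA size fuel row col wr wc z00 z01 z11 z10) step := by
  induction fuel with
  | zero => intro p _ _ _ _ _ _ _ _ _; simp [pvLoopA, pvEmitA, pvApplyW]
  | succ fuel ih =>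
    intro p row col wr wc step z00 z01 z11 z10
    simp only [pvLoopA, pvEmitA, pvApplyW]
    split_ifs <;> apply ih

theorem pvEmitA_take (size : Int) (k : Nat) :
    ∀ (k' : Nat) (row col wr wc z00 z01 z11 z10 : Int), k ≤ k' →
    pvEmitA size k row col wr wc z00 z01 z11 z10
      = (pvEmitA size k' row col wr wc z00 z01 z11 z10).take k := by
  induction k with
  | zero => intro k' _ _ _ _ _ _ _ _ _; simp [pvEmitA]
  | succ k ih =>
    intro k' row col wr wc z00 z01 z11 z10 h
    obtain ⟨k'', rfl⟩ : ∃ k'', k' = k'' + 1 := ⟨k' - 1, by omega⟩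
    simp only [pvEmitA, List.take_succ_cons]
    split_ifs <;> exact congrArg _ (ih k'' _ _ _ _ _ _ _ _ (by omega))

theorem pvFold_applyW (a M : Int) (l : List (Int × Int)) :
    ∀ (s : Int) (p : List Int),
    (PySem.List.enumerate l s).foldl
        (fun q ic => if ic.1 < M then PySem.List.pySetD q (ic.2.1 * a + ic.2.2) (ic.1 + 1) else q) p
      = pvApplyW a p (l.take (M - s).toNat) (s+1) := by
  induction l with
  | nil => intro s p; simp [PySem.List.enumerate, pvApplyW]
  | cons hd tl ih =>
    obtain ⟨r, c⟩ := hd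
    intro s p
    rw [PySem.List.enumerate_cons, List.foldl_cons]
    by_cases h : s < M
    · have ht : (M - s).toNat = (M - (s+1)).toNat + 1 := by omega
      rw [ht, List.take_succ_cons]
      simp only [if_pos h]
      exact ih (s+1) _
    · have ht : (M - s).toNat = 0 := by omega
      have ht' : (M - (s+1)).toNat = 0 := by omega
      simp only [if_neg h, ht, List.take_zero]
      have h2 := ih (s+1) p
      rw [ht', List.take_zero] at h2
      exact h2

theorem pvSpiralEq : ∀ (sn : Nat) (m size : Int) (f : Nat), size = 2*m + sn - 1 → sn < f →
    pvEmitA size (sn*sn) m (m-1) 0 1 m m m m = pvSpiralB f m (size-m) m (size-m) [] := by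
  intro sn
  induction sn using Nat.strong_induction_on with
  | _ sn IH =>
  match sn with
  | 0 =>
    intro m size f hs hf
    obtain ⟨f', rfl⟩ : ∃ f', f = f'+1 := ⟨f-1, by omega⟩
    simp only [pvSpiralB]
    rw [if_neg (by omega)]
    simp [pvEmitA]
  | 1 =>
    intro m size f hs hf
    obtain ⟨f'', rfl⟩ : ∃ f'', f = f''+1+1 := ⟨f-2, by omega⟩
    rw [show (1*1 : Nat) = 0+1 by norm_num]
    rw [pvStep2 size 0 m (m-1) 0 1 m m m m (by omega) (by constructor <;> omega)]
    rw [show (m:Int)+0 = m by ring, show (m:Int)-1+1 = m by ring]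
    simp only [pvSpiralB]
    rw [if_pos (show m ≤ size - m ∧ m ≤ size - m by constructor <;> omega)]
    rw [if_neg (show ¬ (m+1 ≤ size - m) by omega), if_neg (show ¬ (m+1 ≤ size - m) by omega),
        if_neg (show ¬ (m ≤ size - m - 1) by omega), if_neg (show ¬ (m ≤ size - m - 1) by omega)]
    rw [if_neg (show ¬ (m+1 ≤ size - m ∧ m ≤ size - m - 1) by omega)]
    rw [show size - m + 1 = m + 1 by omega]
    rw [PySem.List.pyRange_one_singleton, PySem.List.pyRange_one_eq_nil (by omega)]
    simp [pvEmitA]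
  | 2 =>
    intro m size f hs hf
    obtain ⟨f'', rfl⟩ : ∃ f'', f = f''+1+1 := ⟨f-2, by omega⟩
    rw [show (2*2 : Nat) = 0+1+1+1+1 by norm_num]
    rw [pvStep0 size (0+1+1+1) m (m-1) 0 1 m m m m (by omega) (by omega) (by omega) (by omega)]
    rw [show (m:Int)+0 = m by ring, show (m:Int)-1+1 = m by ring]
    rw [pvStep2 size (0+1+1) m m 0 1 m m m m (by omega) (by constructor <;> omega)]
    rw [show (m:Int)+0 = m by ring]
    rw [pvStep3 size (0+1) m (m+1) 1 0 (m+1) m m m (by omega) (by omega) (by constructor <;> omega)]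
    rw [show (m:Int)+1+0 = m+1 by ring]
    rw [pvStep1 size 0 (m+1) (m+1) 0 (-1) (m+1) (m+1) m m (by constructor <;> omega)]
    rw [show (m:Int)+1+0 = m+1 by ring, show (m:Int)+1+-1 = m by ring]
    simp only [pvSpiralB]
    rw [if_pos (show m ≤ size - m ∧ m ≤ size - m by constructor <;> omega)]
    rw [if_pos (show m+1 ≤ size - m by omega), if_pos (show m+1 ≤ size - m by omega),
        if_pos (show m ≤ size - m - 1 by omega), if_pos (show m ≤ size - m - 1 by omega)]
    rw [if_neg (show ¬ (m+1 ≤ size - m - 1 ∧ m+1 ≤ size - m - 1) by omega)]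
    rw [show size - m + 1 = m + 1 + 1 by omega]
    rw [PySem.List.pyRange_one_cons (show m < m+1+1 by omega), PySem.List.pyRange_one_singleton]
    rw [show size - m - 1 = m by omega]
    rw [PySem.List.pyRange_neg_one_cons (show m - 1 < m by omega),
        PySem.List.pyRange_neg_one_eq_nil (by omega)]
    rw [show (m:Int)+1-1 = m by ring]
    rw [PySem.List.pyRange_neg_one_eq_nil (by omega)]
    simp [pvEmitA]
    omega
  | (n+3) =>
    intro m size f hs hf
    obtain ⟨f', rfl⟩ : ∃ f', f = f'+1 := ⟨f-1, by omega⟩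
    rw [show (n+3)*(n+3) = 4*(n+2) + (n+1)*(n+1) by ring]
    rw [pvRing n m size (by omega) ((n+1)*(n+1))]
    have ihh := IH (n+1) (by omega) (m+1) size f' (by push_cast; omega) (by omega)
    rw [show (m:Int)+1-1 = m by ring] at ihh
    simp only [pvSpiralB]
    rw [if_pos ⟨by omega, by omega⟩]
    rw [if_pos (show m+1 ≤ size - m by omega), if_pos (show m+1 ≤ size - m by omega),
        if_pos (show m ≤ size - m - 1 by omega), if_pos (show m ≤ size - m - 1 by omega)]
    rw [show size - (m+1) = size - m - 1 by ring] at ihh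
    rw [ihh]
    rw [show (m:Int)+1-1 = m by ring]
    conv_rhs => rw [pvSpiralB_acc]
    simp [List.append_assoc]

theorem make_solved_puzzle_spec : Claim_equal_make_solved_puzzle := by
  intro a _ hpre
  unfold Spec_make_solved_puzzle
  unfold Pre_make_solved_puzzle at hpre
  by_cases ha : a ≤ 0
  · have h2 : a = -1 ∨ a = 0 := by omega
    rcases h2 with rfl | rfl <;> decide
  · replace ha : 1 ≤ a := by omega
    simp only [make_solved_puzzle, make_solved_puzzle_alt]
    rw [pvLoopA_applyW]
    rw [pvFold_applyW]
    have hsn : ((a.toNat : Int)) = a := Int.toNat_of_nonneg (by omega)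
    have hNN : ((a.toNat * a.toNat : Nat) : Int) = a * a := by push_cast; rw [hsn]
    have hle : (a*a-1).toNat ≤ a.toNat * a.toNat := by omega
    rw [pvEmitA_take (a-1) ((a*a-1).toNat) (a.toNat * a.toNat) 0 (-1) 0 1 0 0 0 0 hle]
    have hsp := pvSpiralEq a.toNat 0 (a-1) ((a+1).toNat) (by omega) (by omega)
    norm_num at hsp
    rw [hsp]
    norm_num
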